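-- pv_equiv track=rewrite | github.com/kren1504/Training | readingVerticaly.py | readingVertically
-- ===== SOURCE A (Python) =====
-- def readingVertically(arr):
--     res = ""
--     cantVueltas = 0
--
--     tamanos = map(len, arr)
--
--     maximo = max(tamanos)
--
--
--     while cantVueltas != maximo:
--
--         for palabra in arr:
--
--             if cantVueltas < len(palabra):
--                 res+=palabra[cantVueltas]
--
--         cantVueltas +=1
--
--     return res
-- ===== SOURCE B (Python) =====
-- def readingVertically(arr):
--     # Round-based reading on live suffixes: each round emits the heads of all
--     # still-nonempty word suffixes (in original order) and keeps their tails,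
--     # so no column index into the original words is ever used.
--     out = []
--     cur = [w for w in arr if w]
--     while cur:
--         out.extend(w[0] for w in cur)
--         cur = [w[1:] for w in cur if len(w) > 1]
--     return "".join(out)
-- ===== Notes on version B (the rewrite author's own statement) =====
-- stated objective: alternative
-- what changed: Instead of scanning every word for each column index up to the maximum length, B repeatedly emits the heads of the still-live word suffixes and keeps their tails, with no column indexing at all; it trades index arithmetic for suffix construction at a similar overall cost.
-- outside the precondition, e.g. on readingVertically([]): A raises ValueError, B returns ''
-- crash fix: On the empty list A raises ValueError (max of empty sequence) while B returns ''. — e.g. on readingVertically([]): A raises ValueError, B returns ""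
import Mathlib
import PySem

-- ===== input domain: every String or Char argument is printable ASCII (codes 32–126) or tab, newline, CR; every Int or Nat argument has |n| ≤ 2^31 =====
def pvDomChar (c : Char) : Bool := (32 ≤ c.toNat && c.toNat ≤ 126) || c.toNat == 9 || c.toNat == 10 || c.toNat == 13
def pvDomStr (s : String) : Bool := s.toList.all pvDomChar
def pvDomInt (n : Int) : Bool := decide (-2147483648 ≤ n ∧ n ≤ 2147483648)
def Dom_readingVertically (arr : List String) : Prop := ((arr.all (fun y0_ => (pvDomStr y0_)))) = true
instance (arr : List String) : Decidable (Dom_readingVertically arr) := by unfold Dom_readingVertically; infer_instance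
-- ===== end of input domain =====

-- B reads the columns by repeatedly emitting the heads of the still-live word
-- suffixes and keeping their tails, instead of indexing every word per column.

-- ===== PORT A =====
-- the while loop 'while cantVueltas != maximo' runs exactly 'maximo - cantVueltas'
-- times (cantVueltas starts at 0 and increments by 1); 'remaining' counts those rounds
def readingVerticallyGo (arr : List String) (cant : Nat) (remaining : Nat)
    (res : List Char) : List Char :=
  match remaining with
  | 0 => res
  | r + 1 =>
      readingVerticallyGo arr (cant + 1) r
        (arr.foldl (fun acc w =>
          if cant < w.toList.length then acc ++ [(w.toList).getD cant ' '] else acc) res)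

def readingVertically (arr : List String) : String :=
  -- maximo = max(map(len, arr)); Python raises ValueError on empty arr, excluded by Pre_
  String.ofList (readingVerticallyGo arr 0
    ((PySem.List.max? (arr.map (fun w => PySem.Str.len w)) id).getD 0).toNat [])

-- ===== PORT B =====
-- cur = [w[1:] for w in cur if len(w) > 1]
def pvStep (cur : List (List Char)) : List (List Char) :=
  (cur.filter (fun w => 1 < w.length)).map (fun w => w.drop 1)

theorem pvStep_cons (w : List Char) (t : List (List Char)) :
    pvStep (w :: t) = if 1 < w.length then w.drop 1 :: pvStep t else pvStep t := by
  unfold pvStep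
  by_cases h : 1 < w.length <;> simp [h]

-- termination helper for the B loop (measure: total chars + number of live suffixes)
theorem pvAltMeasure (cur : List (List Char)) :
    ((pvStep cur).map List.length).sum + (pvStep cur).length ≤ (cur.map List.length).sum := by
  induction cur with
  | nil => simp [pvStep]
  | cons w t ih =>
      rw [pvStep_cons]
      by_cases h : 1 < w.length
      · rw [if_pos h]
        simp only [List.map_cons, List.sum_cons, List.length_cons, List.length_drop]
        omega
      · rw [if_neg h]
        simp only [List.map_cons, List.sum_cons]
        omega

def readingVerticallyAltGo (cur : List (List Char)) (out : List Char) : List Char :=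
  if h : cur = [] then out
  else
    readingVerticallyAltGo (pvStep cur) (out ++ cur.filterMap List.head?)
termination_by (cur.map List.length).sum + cur.length
decreasing_by
  have := pvAltMeasure cur
  have hl : 1 ≤ cur.length := List.length_pos_of_ne_nil h
  omega

def readingVertically_alt (arr : List String) : String :=
  -- cur = [w for w in arr if w], as character lists
  String.ofList (readingVerticallyAltGo ((arr.map (fun w => w.toList)).filter (fun w => w ≠ [])) [])

-- ===== PRECONDITION & SPEC =====
-- Pre_ excludes only the empty list, on which Python A raises ValueError (max of empty sequence)
def Pre_readingVertically (arr : List String) : Prop := arr ≠ []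
instance (arr : List String) : Decidable (Pre_readingVertically arr) := by
  unfold Pre_readingVertically; infer_instance
def pvWitness_readingVertically : List String := ["ab", "c"]

-- On the empty list A raises ValueError (max of empty sequence) while B returns "".
def Raises_readingVertically (arr : List String) : Prop := arr = []
instance (arr : List String) : Decidable (Raises_readingVertically arr) := by
  unfold Raises_readingVertically; infer_instance
def pvRaiseWitness_readingVertically : List String := []
def pvRaiseWitnessOut_readingVertically : String := ""

def Spec_readingVertically (arr : List String) (out : String) : Prop :=
  out = readingVertically_alt arr
instance (arr : List String) (out : String) : Decidable (Spec_readingVertically arr out) := by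
  unfold Spec_readingVertically; infer_instance

-- ===== CLAIM (what is proved, stated in full; the proofs are below) =====
def Claim_equal_readingVertically : Prop :=
  ∀ (arr : List String), Dom_readingVertically arr → Pre_readingVertically arr →
    Spec_readingVertically arr (readingVertically arr)

def Claim_raises_readingVertically : Prop :=
  (∀ (arr : List String), Dom_readingVertically arr → Raises_readingVertically arr →
    ¬ Pre_readingVertically arr) ∧
  (Dom_readingVertically (pvRaiseWitness_readingVertically) ∧
    Raises_readingVertically (pvRaiseWitness_readingVertically) ∧
    readingVertically_alt (pvRaiseWitness_readingVertically) = pvRaiseWitnessOut_readingVertically)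

-- ===== LEMMAS AND PROOFS =====

-- column c of a list of character lists
def pvCol (L : List (List Char)) (c : Nat) : List Char := L.filterMap (fun w => w[c]?)

-- columns c, c+1, …, c+k-1 concatenated
def pvCols (L : List (List Char)) (c k : Nat) : List Char :=
  match k with
  | 0 => []
  | k + 1 => pvCol L c ++ pvCols L (c + 1) k

-- live suffixes at column c
def pvLive (L : List (List Char)) (c : Nat) : List (List Char) :=
  (L.map (List.drop c)).filter (fun w => w ≠ [])

theorem pvColA (arr : List String) (c : Nat) : ∀ res : List Char,
    arr.foldl (fun acc w =>
      if c < w.toList.length then acc ++ [(w.toList).getD c ' '] else acc) res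
    = res ++ pvCol (arr.map (fun w => w.toList)) c := by
  induction arr with
  | nil => intro res; simp [pvCol]
  | cons w t ih =>
      intro res
      rw [List.foldl_cons]
      by_cases h : c < w.toList.length
      · rw [if_pos h, ih]
        simp [pvCol, List.getD, List.getElem?_eq_getElem h]
      · rw [if_neg h, ih]
        simp [pvCol, List.getElem?_eq_none (by omega : w.toList.length ≤ c)]

theorem pvGoA (arr : List String) : ∀ (k c : Nat) (res : List Char),
    readingVerticallyGo arr c k res = res ++ pvCols (arr.map (fun w => w.toList)) c k := by
  intro k
  induction k with
  | zero => intro c res; simp [readingVerticallyGo, pvCols]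
  | succ k ih =>
      intro c res
      have hstep : readingVerticallyGo arr c (k + 1) res
          = readingVerticallyGo arr (c + 1) k
              (arr.foldl (fun acc w =>
                if c < w.toList.length then acc ++ [(w.toList).getD c ' '] else acc) res) := rfl
      rw [hstep, ih, pvColA]
      simp [pvCols, List.append_assoc]

theorem pvHeads (L : List (List Char)) (c : Nat) :
    (pvLive L c).filterMap List.head? = pvCol L c := by
  unfold pvLive pvCol
  induction L with
  | nil => simp
  | cons w t ih =>
      rw [List.map_cons, List.filter_cons]
      by_cases h : w.drop c = []
      · have hlen : w.length ≤ c := by rw [← List.drop_eq_nil_iff]; exact h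
        rw [if_neg (by simp [h]), ih, List.filterMap_cons,
            List.getElem?_eq_none hlen]
      · rw [if_pos (by simp [h]), List.filterMap_cons, List.filterMap_cons,
            List.head?_drop]
        simp only [ne_eq, decide_not] at ih
        cases hx : w[c]? <;> simp [ih]

theorem pvNext (L : List (List Char)) (c : Nat) :
    pvStep (pvLive L c) = pvLive L (c + 1) := by
  unfold pvStep pvLive
  induction L with
  | nil => simp
  | cons w t ih =>
      rw [List.map_cons, List.filter_cons, List.map_cons, List.filter_cons]
      have hdd : (w.drop c).drop 1 = w.drop (c + 1) := by
        rw [List.drop_drop, Nat.add_comm]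
      by_cases h1 : c + 1 < w.length
      · rw [if_pos (by simp [List.drop_eq_nil_iff]; omega),
            if_pos (by simp [List.drop_eq_nil_iff]; omega),
            List.filter_cons,
            if_pos (by simp [List.length_drop]; omega),
            List.map_cons, hdd, ih]
      · by_cases h0 : c < w.length
        · rw [if_pos (by simp [List.drop_eq_nil_iff]; omega),
              if_neg (by simp [List.drop_eq_nil_iff]; omega),
              List.filter_cons,
              if_neg (by simp [List.length_drop]; omega), ih]
        · rw [if_neg (by simp [List.drop_eq_nil_iff]; omega),
              if_neg (by simp [List.drop_eq_nil_iff]; omega), ih]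

theorem pvLive_nil (L : List (List Char)) (c : Nat) (h : ∀ w ∈ L, w.length ≤ c) :
    pvLive L c = [] := by
  unfold pvLive
  rw [List.filter_eq_nil_iff]
  intro w hw
  simp only [List.mem_map] at hw
  obtain ⟨v, hv, rfl⟩ := hw
  simp [List.drop_eq_nil_iff.mpr (h v hv)]

theorem pvCol_nil (L : List (List Char)) (c : Nat) (h : ∀ w ∈ L, w.length ≤ c) :
    pvCol L c = [] := by
  unfold pvCol
  rw [List.filterMap_eq_nil_iff]
  intro w hw
  simp [List.getElem?_eq_none (h w hw)]

theorem pvCols_nil (L : List (List Char)) : ∀ (k c : Nat), (∀ w ∈ L, w.length ≤ c) →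
    pvCols L c k = [] := by
  intro k
  induction k with
  | zero => intro c h; simp [pvCols]
  | succ k ih =>
      intro c h
      simp [pvCols, pvCol_nil L c h, ih (c + 1) (fun w hw => by have := h w hw; omega)]

theorem pvGoB (L : List (List Char)) : ∀ (k c : Nat) (out : List Char),
    (∀ w ∈ L, w.length ≤ c + k) →
    readingVerticallyAltGo (pvLive L c) out = out ++ pvCols L c k := by
  intro k
  induction k with
  | zero =>
      intro c out h
      rw [readingVerticallyAltGo, dif_pos (pvLive_nil L c (by simpa using h))]
      simp [pvCols]
  | succ k ih =>
      intro c out h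
      by_cases hnil : pvLive L c = []
      · rw [readingVerticallyAltGo, dif_pos hnil]
        have hall : ∀ w ∈ L, w.length ≤ c := by
          intro w hw
          by_contra hc
          have hmem : w.drop c ∈ (L.map (List.drop c)) := List.mem_map_of_mem hw
          have : w.drop c ≠ [] := by rw [Ne, List.drop_eq_nil_iff]; omega
          have : w.drop c ∈ pvLive L c := by
            unfold pvLive; rw [List.mem_filter]; simp [hmem, this]
          simp [hnil] at this
        simp [pvCols, pvCol_nil L c hall,
          pvCols_nil L k (c + 1) (fun w hw => Nat.le_succ_of_le (hall w hw))]
      · rw [readingVerticallyAltGo, dif_neg hnil]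
        show readingVerticallyAltGo (pvStep (pvLive L c)) _ = _
        rw [show pvStep (pvLive L c) = pvLive L (c+1) from pvNext L c, pvHeads,
            ih (c + 1) (out ++ pvCol L c) (fun w hw => by have := h w hw; omega)]
        simp [pvCols, List.append_assoc]

theorem pvMaxBound (arr : List String) (h : arr ≠ []) :
    ∀ w ∈ arr, w.toList.length ≤
      ((PySem.List.max? (arr.map (fun w => PySem.Str.len w)) id).getD 0).toNat := by
  intro w hw
  obtain ⟨m, hm⟩ : ∃ m, PySem.List.max? (arr.map (fun w => PySem.Str.len w)) id = some m := by
    cases hmax : PySem.List.max? (arr.map (fun w => PySem.Str.len w)) id with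
    | none =>
        rw [PySem.List.max?_eq_none_iff] at hmax
        simp [List.map_eq_nil_iff] at hmax
        exact absurd hmax h
    | some m => exact ⟨m, rfl⟩
  have hle := PySem.List.max?_isMax hm (PySem.Str.len w) (List.mem_map_of_mem hw)
  have hlen : PySem.Str.len w = (w.toList.length : Int) := by
    simp [PySem.Str.len_eq]
  rw [hm]
  simp only [Option.getD_some]
  simp only [id] at hle
  rw [hlen] at hle
  omega

theorem pvMain (arr : List String) (h : Pre_readingVertically arr) :
    readingVertically arr = readingVertically_alt arr := by
  unfold Pre_readingVertically at h
  unfold readingVertically readingVertically_alt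
  have hb := pvMaxBound arr h
  have hinit : (arr.map (fun w => w.toList)).filter (fun w => w ≠ [])
      = pvLive (arr.map (fun w => w.toList)) 0 := by
    unfold pvLive; simp [Function.comp_def]
  rw [pvGoA, hinit,
      pvGoB (arr.map (fun w => w.toList))
        ((PySem.List.max? (arr.map (fun w => PySem.Str.len w)) id).getD 0).toNat 0 []
        (by intro w hw; simp only [List.mem_map] at hw; obtain ⟨v, hv, rfl⟩ := hw
            simpa using hb v hv)]

-- ===== VERDICT (by name: the statement is the Claim_ definition above) =====
theorem readingVertically_spec : Claim_equal_readingVertically := by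
  intro arr _ hpre
  unfold Spec_readingVertically
  exact pvMain arr hpre

theorem readingVertically_raises : Claim_raises_readingVertically := by
  unfold Claim_raises_readingVertically
  refine ⟨fun arr _ hr hp => hp hr, by decide, by decide, ?_⟩
  have hgo : readingVerticallyAltGo [] [] = [] := by
    rw [readingVerticallyAltGo]; simp
  simp [readingVertically_alt, pvRaiseWitness_readingVertically,
    pvRaiseWitnessOut_readingVertically, hgo]

-- witness self-check: the raise witness really lies in Raises_ (uses the theorem above)
theorem pvRaiseWitness_ok : Raises_readingVertically pvRaiseWitness_readingVertically :=
  readingVertically_raises.2.2.1
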